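-- pv_equiv track=rewrite | github.com/guswnsakvk1/Algorithm | programmers/포켓몬.py | solution
-- ===== SOURCE A (Python) =====
-- def solution(nums):
--     answer = 0
--     poketmons = {}
--     for poketmon in nums:
--         if poketmon in poketmons:
--             poketmons[poketmon] = +1
--         else:
--             poketmons[poketmon] = 1
--     if(len(poketmons) >= len(nums) // 2):
--         answer = len(nums) // 2
--     else:
--         answer = len(poketmons)
--     return answer
-- ===== SOURCE B (Python) =====
-- def solution(nums):
--     # Sort-then-scan: count distinct values as the number of run starts
--     # in the sorted copy, then cap at len(nums) // 2.
--     s = sorted(nums)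
--     distinct = 0
--     prev = None
--     for x in s:
--         if prev is None or x != prev:
--             distinct += 1
--         prev = x
--     return min(distinct, len(nums) // 2)
-- ===== Notes on version B (the rewrite author's own statement) =====
-- stated objective: alternative
-- what changed: Replaces the dict-membership accumulation with a sort-then-scan: sort a copy, count run starts in one linear pass to get the distinct count, then take min with len(nums)//2.
import Mathlib
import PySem

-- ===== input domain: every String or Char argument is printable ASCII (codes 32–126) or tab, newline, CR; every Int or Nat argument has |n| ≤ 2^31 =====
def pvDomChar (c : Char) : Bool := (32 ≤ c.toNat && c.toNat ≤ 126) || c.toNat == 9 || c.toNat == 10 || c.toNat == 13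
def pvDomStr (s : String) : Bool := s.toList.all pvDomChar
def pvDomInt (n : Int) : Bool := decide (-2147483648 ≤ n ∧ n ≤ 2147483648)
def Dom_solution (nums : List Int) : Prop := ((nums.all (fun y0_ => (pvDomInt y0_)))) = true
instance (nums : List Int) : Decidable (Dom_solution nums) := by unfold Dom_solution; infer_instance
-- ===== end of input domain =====

-- B replaces A's dict accumulation by a sort-then-scan distinct count (alternative decomposition, not faster).

-- ===== PORT A =====
def solution (nums : List Int) : Int :=
  let poketmons : PySem.Dict Int Int :=
    nums.foldl (fun d poketmon =>
      if d.contains poketmon then d.insert poketmon 1 else d.insert poketmon 1)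
      PySem.Dict.empty
  if PySem.Int.floordiv (nums.length : Int) 2 ≤ (poketmons.size : Int) then
    PySem.Int.floordiv (nums.length : Int) 2
  else
    (poketmons.size : Int)

-- ===== PORT B =====
def solution_alt (nums : List Int) : Int :=
  let s := PySem.List.sorted nums (fun x => x) false
  let st := s.foldl
    (fun (st : Int × Option Int) x =>
      ((if st.2 = none ∨ ¬ some x = st.2 then st.1 + 1 else st.1), some x))
    ((0 : Int), (none : Option Int))
  min st.1 (PySem.Int.floordiv (nums.length : Int) 2)

-- ===== PRECONDITION & SPEC =====
def Spec_solution (nums : List Int) (out : Int) : Prop := out = solution_alt nums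
instance (nums : List Int) (out : Int) : Decidable (Spec_solution nums out) := by unfold Spec_solution; infer_instance

-- ===== CLAIM (what is proved, stated in full; the proofs are below) =====
def Claim_equal_solution : Prop := ∀ (nums : List Int), Dom_solution nums → Spec_solution nums (solution nums)

-- ===== LEMMAS AND PROOFS =====

-- B's scan step (exactly the lambda in solution_alt)
def pvStep (st : Int × Option Int) (x : Int) : Int × Option Int :=
  ((if st.2 = none ∨ ¬ some x = st.2 then st.1 + 1 else st.1), some x)

-- running the scan over a sorted tail with a previous element below everything
lemma pv_fold_sorted (s : List Int) (hs : s.Pairwise (· ≤ ·)) :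
    ∀ (c p : Int), (∀ x ∈ s, p ≤ x) →
      (s.foldl pvStep (c, some p)).1
        = c + (s.toFinset.card : Int) - (if p ∈ s then 1 else 0) := by
  induction s with
  | nil => intro c p _; simp
  | cons b t ih =>
    intro c p hp
    have hbt : ∀ x ∈ t, b ≤ x := fun x hx => (List.pairwise_cons.mp hs).1 x hx
    have ht : t.Pairwise (· ≤ ·) := (List.pairwise_cons.mp hs).2
    rcases eq_or_ne b p with hbp | hbp
    · subst hbp
      have h1 : pvStep (c, some b) b = (c, some b) := by simp [pvStep]
      rw [List.foldl_cons, h1, ih ht c b hbt]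
      rw [if_pos (List.mem_cons_self : b ∈ b :: t)]
      by_cases hbt' : b ∈ t
      · rw [if_pos hbt']
        have : (b :: t).toFinset = t.toFinset := by
          simp [List.toFinset_cons, Finset.insert_eq_self.mpr (List.mem_toFinset.mpr hbt')]
        rw [this]
      · rw [if_neg hbt']
        have : (b :: t).toFinset.card = t.toFinset.card + 1 := by
          simp [List.toFinset_cons,
            Finset.card_insert_of_notMem (fun h => hbt' (List.mem_toFinset.mp h))]
        rw [this]; push_cast; ring
    · have h1 : pvStep (c, some p) b = (c + 1, some b) := by simp [pvStep, hbp]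
      rw [List.foldl_cons, h1, ih ht (c + 1) b hbt]
      have hpnotin : p ∉ b :: t := by
        intro hmem
        rcases List.mem_cons.mp hmem with h | h
        · exact hbp h.symm
        · exact hbp (le_antisymm (hbt p h) (hp b List.mem_cons_self))
      rw [if_neg hpnotin]
      by_cases hbt' : b ∈ t
      · rw [if_pos hbt']
        have : (b :: t).toFinset = t.toFinset := by
          simp [List.toFinset_cons, Finset.insert_eq_self.mpr (List.mem_toFinset.mpr hbt')]
        rw [this]; ring
      · rw [if_neg hbt']
        have : (b :: t).toFinset.card = t.toFinset.card + 1 := by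
          simp [List.toFinset_cons,
            Finset.card_insert_of_notMem (fun h => hbt' (List.mem_toFinset.mp h))]
        rw [this]; push_cast; ring

-- the full scan on a sorted list counts the distinct elements
lemma pv_scan (s : List Int) (hs : s.Pairwise (· ≤ ·)) :
    (s.foldl pvStep ((0 : Int), (none : Option Int))).1 = (s.toFinset.card : Int) := by
  cases s with
  | nil => simp
  | cons a t =>
    have hat : ∀ x ∈ t, a ≤ x := fun x hx => (List.pairwise_cons.mp hs).1 x hx
    have ht : t.Pairwise (· ≤ ·) := (List.pairwise_cons.mp hs).2
    have h1 : pvStep ((0 : Int), none) a = (1, some a) := by simp [pvStep]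
    rw [List.foldl_cons, h1, pv_fold_sorted t ht 1 a hat]
    by_cases hat' : a ∈ t
    · rw [if_pos hat']
      have : (a :: t).toFinset = t.toFinset := by
        simp [List.toFinset_cons, Finset.insert_eq_self.mpr (List.mem_toFinset.mpr hat')]
      rw [this]; ring
    · rw [if_neg hat']
      have : (a :: t).toFinset.card = t.toFinset.card + 1 := by
        simp [List.toFinset_cons,
          Finset.card_insert_of_notMem (fun h => hat' (List.mem_toFinset.mp h))]
      rw [this]; push_cast; ring

-- A's dict collects exactly the distinct elements
lemma pv_dict_size (nums : List Int) :
    (nums.foldl (fun d poketmon =>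
        if d.contains poketmon then d.insert poketmon 1 else d.insert poketmon 1)
        (PySem.Dict.empty : PySem.Dict Int Int)).size = nums.toFinset.card := by
  have hcongr : nums.foldl (fun d poketmon =>
        if d.contains poketmon then d.insert poketmon 1 else d.insert poketmon 1)
        (PySem.Dict.empty : PySem.Dict Int Int)
      = nums.foldl (fun d poketmon => d.insert poketmon ((fun _ _ => (1 : Int)) d poketmon))
        PySem.Dict.empty := by
    apply PySem.List.foldl_congr_mem
    intro acc x _
    split <;> rfl
  rw [hcongr]
  have hkeys := PySem.Dict.keys_foldl_insert (l := nums)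
    (f := fun _ _ => (1 : Int)) (d := (PySem.Dict.empty : PySem.Dict Int Int))
  have hsize : ∀ d : PySem.Dict Int Int, d.size = d.keys.length := by
    intro d; simp [PySem.Dict.size, PySem.Dict.keys]
  rw [hsize, hkeys]
  have hset : (PySem.Set.update (PySem.Dict.empty : PySem.Dict Int Int).keys nums)
      = PySem.Set.ofList nums := rfl
  rw [hset]
  have hnodup : (PySem.Set.ofList nums).Nodup := PySem.Set.nodup_ofList nums
  have hfin : (PySem.Set.ofList nums).toFinset = nums.toFinset := by
    ext x; simp [PySem.Set.mem_ofList]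
  rw [← hfin, List.toFinset_card_of_nodup hnodup]

-- ===== VERDICT (by name: the statement is the Claim_ definition above) =====
theorem solution_spec : Claim_equal_solution := by
  intro nums _
  unfold Spec_solution
  have hsorted := PySem.List.sorted_pairwise (xs := nums) (key := fun x : Int => x)
  have hperm : (PySem.List.sorted nums (fun x => x) false).Perm nums :=
    PySem.List.sorted_perm nums (fun x => x) false
  have hscan := pv_scan (PySem.List.sorted nums (fun x => x) false) hsorted
  have hA : solution nums
      = (if PySem.Int.floordiv (nums.length : Int) 2 ≤ (nums.toFinset.card : Int) then
          PySem.Int.floordiv (nums.length : Int) 2 else (nums.toFinset.card : Int)) := by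
    show (if PySem.Int.floordiv (nums.length : Int) 2
        ≤ (((nums.foldl (fun d poketmon =>
            if d.contains poketmon then d.insert poketmon 1 else d.insert poketmon 1)
            (PySem.Dict.empty : PySem.Dict Int Int)).size : Int)) then
        PySem.Int.floordiv (nums.length : Int) 2
      else ((nums.foldl (fun d poketmon =>
            if d.contains poketmon then d.insert poketmon 1 else d.insert poketmon 1)
            (PySem.Dict.empty : PySem.Dict Int Int)).size : Int)) = _
    rw [pv_dict_size]
  have hB : solution_alt nums = min (nums.toFinset.card : Int)
      (PySem.Int.floordiv (nums.length : Int) 2) := by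
    show min ((PySem.List.sorted nums (fun x => x) false).foldl pvStep
        ((0 : Int), (none : Option Int))).1 (PySem.Int.floordiv (nums.length : Int) 2) = _
    rw [hscan, List.toFinset_eq_of_perm _ _ hperm]
  rw [hA, hB]
  rcases le_or_gt (PySem.Int.floordiv (nums.length : Int) 2) (nums.toFinset.card : Int) with h | h
  · rw [if_pos h, min_eq_right h]
  · rw [if_neg (not_le.mpr h), min_eq_left (le_of_lt h)]
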